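-- pv_equiv track=rewrite | github.com/pypi-data/pypi-mirror-115 | packages/isec-connect/isec_connect-0.0.2-py3-none-any.whl/isec_connect/isec_ws_sdk.py | parse_market_depth
-- ===== SOURCE A (Python) =====
-- def parse_market_depth(data, exchange):
--     depth=[]
--     for lis in data:
--         dict = {}
--         if exchange=='1':
--             dict["BestBuyRate-1"] = lis[0]
--             dict["BestBuyQty-1"] = lis[1]
--             dict["BestSellRate-1"] = lis[2]
--             dict["BestSellQty-1"] = lis[3]
--             depth.append(dict)
--         else:
--             dict["BestBuyRate-1"] = lis[0]
--             dict["BestBuyQty-1"] = lis[1]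
--             dict["BuyNoOfOrders-1"] = lis[2]
--             dict["BuyFlag-1"] = lis[3]
--             dict["BestSellRate-1"] = lis[4]
--             dict["BestSellQty-1"] = lis[5]
--             dict["SellNoOfOrders-1"] = lis[6]
--             dict["SellFlag-1"] = lis[7]
--             depth.append(dict)
--     return depth
-- ===== SOURCE B (Python) =====
-- def parse_market_depth(data, exchange):
--     # columnar approach: pull each field out as a whole column, then transpose
--     # the columns back into per-row dicts
--     if exchange == '1':
--         keys = ['BestBuyRate-1', 'BestBuyQty-1', 'BestSellRate-1', 'BestSellQty-1']
--     else:
--         keys = ['BestBuyRate-1', 'BestBuyQty-1', 'BuyNoOfOrders-1', 'BuyFlag-1',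
--                 'BestSellRate-1', 'BestSellQty-1', 'SellNoOfOrders-1', 'SellFlag-1']
--     cols = [[lis[i] for lis in data] for i in range(len(keys))]
--     return [dict(zip(keys, row)) for row in zip(*cols)]
-- ===== Notes on version B (the rewrite author's own statement) =====
-- stated objective: alternative
-- what changed: Instead of building each row dict field-by-field inside a branch, B extracts one whole column per field in a first pass and then transposes the columns back into per-row dicts with zip.
import Mathlib
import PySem

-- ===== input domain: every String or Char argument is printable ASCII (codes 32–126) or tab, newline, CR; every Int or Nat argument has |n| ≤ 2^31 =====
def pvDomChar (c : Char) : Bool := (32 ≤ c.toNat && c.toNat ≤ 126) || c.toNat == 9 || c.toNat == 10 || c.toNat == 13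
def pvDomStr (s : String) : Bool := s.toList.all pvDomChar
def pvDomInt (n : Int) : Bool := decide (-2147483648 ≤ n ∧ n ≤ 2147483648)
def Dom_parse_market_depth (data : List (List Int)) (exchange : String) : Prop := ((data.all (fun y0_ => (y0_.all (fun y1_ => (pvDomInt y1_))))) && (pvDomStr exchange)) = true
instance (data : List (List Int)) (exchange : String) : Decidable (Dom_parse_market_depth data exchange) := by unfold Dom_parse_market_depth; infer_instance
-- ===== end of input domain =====

-- B replaces A's per-row branched field assignments by a columnar pass (one column
-- per field) followed by a transpose back into per-row dicts (objective: alternative).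

-- ===== PORT A =====
-- pyGetD's default 0 is never reached under Pre_ (rows are long enough).
def parse_market_depth (data : List (List Int)) (exchange : String) : List (List (String × Int)) :=
  data.foldl (fun depth lis =>
    if exchange == "1" then
      depth ++ [[("BestBuyRate-1", PySem.List.pyGetD lis 0 0),
                 ("BestBuyQty-1", PySem.List.pyGetD lis 1 0),
                 ("BestSellRate-1", PySem.List.pyGetD lis 2 0),
                 ("BestSellQty-1", PySem.List.pyGetD lis 3 0)]]
    else
      depth ++ [[("BestBuyRate-1", PySem.List.pyGetD lis 0 0),
                 ("BestBuyQty-1", PySem.List.pyGetD lis 1 0),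
                 ("BuyNoOfOrders-1", PySem.List.pyGetD lis 2 0),
                 ("BuyFlag-1", PySem.List.pyGetD lis 3 0),
                 ("BestSellRate-1", PySem.List.pyGetD lis 4 0),
                 ("BestSellQty-1", PySem.List.pyGetD lis 5 0),
                 ("SellNoOfOrders-1", PySem.List.pyGetD lis 6 0),
                 ("SellFlag-1", PySem.List.pyGetD lis 7 0)]]) []

-- ===== PORT B =====
def pvKeys (exchange : String) : List String :=
  if exchange == "1" then
    ["BestBuyRate-1", "BestBuyQty-1", "BestSellRate-1", "BestSellQty-1"]
  else
    ["BestBuyRate-1", "BestBuyQty-1", "BuyNoOfOrders-1", "BuyFlag-1",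
     "BestSellRate-1", "BestSellQty-1", "SellNoOfOrders-1", "SellFlag-1"]

-- cols = [[lis[i] for lis in data] for i in range(len(keys))];
-- zip(*cols) yields one row per index 0 ≤ j < len(data) (every column has length
-- len(data) and keys is never empty), so the transpose is indexed by j.
def parse_market_depth_alt (data : List (List Int)) (exchange : String) : List (List (String × Int)) :=
  let keys := pvKeys exchange
  let cols := (PySem.List.pyRange 0 keys.length 1).map
    (fun i => data.map (fun lis => PySem.List.pyGetD lis i 0))
  (PySem.List.pyRange 0 data.length 1).map
    (fun j => keys.zip (cols.map (fun col => PySem.List.pyGetD col j 0)))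

-- ===== PRECONDITION & SPEC =====
-- Pre_ excludes inputs where Python A raises IndexError: a row shorter than 4
-- (exchange == '1') resp. 8 (otherwise).
def Pre_parse_market_depth (data : List (List Int)) (exchange : String) : Prop :=
  ∀ lis ∈ data, (if exchange == "1" then 4 else 8) ≤ lis.length
instance (data : List (List Int)) (exchange : String) : Decidable (Pre_parse_market_depth data exchange) := by
  unfold Pre_parse_market_depth; infer_instance
def pvWitness_parse_market_depth : List (List Int) × String := ([[1, 2, 3, 4]], "1")

def Spec_parse_market_depth (data : List (List Int)) (exchange : String) (out : List (List (String × Int))) : Prop := out = parse_market_depth_alt data exchange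
instance (data : List (List Int)) (exchange : String) (out : List (List (String × Int))) : Decidable (Spec_parse_market_depth data exchange out) := by unfold Spec_parse_market_depth; infer_instance

-- ===== CLAIM (what is proved, stated in full; the proofs are below) =====
def Claim_equal_parse_market_depth : Prop := ∀ (data : List (List Int)) (exchange : String), Dom_parse_market_depth data exchange → Pre_parse_market_depth data exchange → Spec_parse_market_depth data exchange (parse_market_depth data exchange)

-- ===== LEMMAS AND PROOFS =====

-- ===== VERDICT (by name: the statement is the Claim_ definition above) =====
theorem parse_market_depth_spec : Claim_equal_parse_market_depth := by
  intro data exchange _ _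
  unfold Spec_parse_market_depth parse_market_depth parse_market_depth_alt pvKeys
  have h4 : PySem.List.pyRange 0 (((4 : Nat) : Int)) 1 = [0, 1, 2, 3] := by decide
  have h8 : PySem.List.pyRange 0 (((8 : Nat) : Int)) 1 = [0, 1, 2, 3, 4, 5, 6, 7] := by decide
  by_cases h : exchange == "1" <;>
    · simp only [h, if_true, if_false, Bool.false_eq_true, List.nil_append,
        PySem.List.foldl_append_singleton_eq_map, List.length_cons, List.length_nil,
        show ((0:Nat)+1+1+1+1 = 4) from rfl, show ((0:Nat)+1+1+1+1+1+1+1+1 = 8) from rfl,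
        h4, h8, List.map_cons, List.map_nil, List.zip_cons_cons, List.zip_nil_right]
      refine List.ext_getElem (by simp [PySem.List.length_pyRange_one]) (fun j hj hj' => ?_)
      simp only [List.getElem_map, PySem.List.getElem_pyRange_one, zero_add,
        PySem.List.pyGetD_natCast, List.getD_eq_getElem?_getD, List.getElem?_map]
      rw [List.getElem?_eq_getElem (by simpa using hj)]
      simp
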